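-- pv_equiv track=rewrite | github.com/Callmebaby1805/firstre | test10.py | _mask_ranges
-- ===== SOURCE A (Python) =====
-- def _merge_spans(spans):
--     if not spans:
--         return []
--     spans = sorted(spans)
--     merged = [list(spans[0])]
--     for s, e in spans[1:]:
--         if s <= merged[-1][1]:
--             merged[-1][1] = max(merged[-1][1], e)
--         else:
--             merged.append([s, e])
--     return [(s, e) for s, e in merged]
--
-- def _mask_ranges(text, spans, tag):
--     spans = _merge_spans(spans)
--     buckets, out, last = [], [], 0
--     for s, e in spans:
--         out.append(text[last:s])
--         out.append(f'§{tag}§{len(buckets)}§')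
--         buckets.append(text[s:e])
--         last = e
--     out.append(text[last:])
--     return ''.join(out), buckets
-- ===== SOURCE B (Python) =====
-- def _mask_ranges(text, spans, tag):
--     out, buckets, last = [], [], 0
--     spans = sorted(spans)
--     if spans:
--         (gs, ge), rest = spans[0], spans[1:]
--         for s, e in rest:
--             if s <= ge:
--                 ge = max(ge, e)
--             else:
--                 out.append(text[last:gs])
--                 out.append(f'§{tag}§{len(buckets)}§')
--                 buckets.append(text[gs:ge])
--                 last = ge
--                 gs, ge = s, e
--         out.append(text[last:gs])
--         out.append(f'§{tag}§{len(buckets)}§')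
--         buckets.append(text[gs:ge])
--         last = ge
--     out.append(text[last:])
--     return ''.join(out), buckets
-- ===== Notes on version B (the rewrite author's own statement) =====
-- stated objective: simpler
-- what changed: B fuses A's two phases (build a merged-intervals list, then a second loop emitting masked text and buckets) into one pass over the sorted spans that keeps only the current merged group and flushes it when a gap appears, eliminating the intermediate merged list and the _merge_spans helper.
import Mathlib
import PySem

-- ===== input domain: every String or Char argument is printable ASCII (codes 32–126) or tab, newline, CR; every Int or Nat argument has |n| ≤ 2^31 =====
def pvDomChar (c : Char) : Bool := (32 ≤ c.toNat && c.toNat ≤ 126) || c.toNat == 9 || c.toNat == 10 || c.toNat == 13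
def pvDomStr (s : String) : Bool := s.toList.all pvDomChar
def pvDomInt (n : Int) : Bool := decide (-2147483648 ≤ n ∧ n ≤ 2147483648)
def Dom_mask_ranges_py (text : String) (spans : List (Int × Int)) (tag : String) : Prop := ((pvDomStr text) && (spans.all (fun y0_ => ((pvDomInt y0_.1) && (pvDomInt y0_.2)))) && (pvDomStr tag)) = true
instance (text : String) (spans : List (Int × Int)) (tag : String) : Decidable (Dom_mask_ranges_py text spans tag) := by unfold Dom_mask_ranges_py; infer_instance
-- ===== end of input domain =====

-- B fuses A's two passes (merge the sorted spans into a list, then emit) into one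
-- pass that keeps only the current merged group; objective: simpler (no intermediate
-- merged-intervals list), same asymptotic cost.

-- ===== PORT A =====
-- f'§{tag}§{len(buckets)}§'
def pvTagChunk (tagc : List Char) (n : Nat) : List Char :=
  '§' :: tagc ++ '§' :: (PySem.Int.toStr (n : Int)).toList ++ ['§']

-- the loop of _merge_spans over spans[1:]; merged[-1][1] = max(...) updates the last pair
def pvMergeLoop (merged : List (Int × Int)) (rest : List (Int × Int)) : List (Int × Int) :=
  rest.foldl (fun m p =>
    let g := m.getLastD (0, 0)
    if p.1 ≤ g.2 then m.dropLast ++ [(g.1, max g.2 p.2)] else m ++ [p]) merged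

-- _merge_spans
def pvMergeSpans (spans : List (Int × Int)) : List (Int × Int) :=
  if spans = [] then []
  else
    match PySem.List.sorted2 spans (fun p => p.1) (fun p => p.2) with
    | [] => []
    | g :: rest => pvMergeLoop [g] rest

-- the emission loop of _mask_ranges; state = (out, buckets, last)
def pvEmit (t tagc : List Char) (st : List (List Char) × List (List Char) × Int)
    (spans : List (Int × Int)) : List (List Char) × List (List Char) × Int :=
  spans.foldl (fun st p =>
    (st.1 ++ [PySem.List.slice t (some st.2.2) (some p.1), pvTagChunk tagc st.2.1.length],
     st.2.1 ++ [PySem.List.slice t (some p.1) (some p.2)], p.2)) st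

def mask_ranges_py (text : String) (spans : List (Int × Int)) (tag : String) : String × List String :=
  let t := text.toList
  let st := pvEmit t tag.toList ([], [], 0) (pvMergeSpans spans)
  (String.ofList ((st.1 ++ [PySem.List.slice t (some st.2.2) none]).flatten),
   st.2.1.map String.ofList)

-- ===== PORT B =====
-- flush the current group (gs, ge): emit text[last:gs], the tag, bucket text[gs:ge], last := ge
def pvFlush (t tagc : List Char) (st : List (List Char) × List (List Char) × Int)
    (gs ge : Int) : List (List Char) × List (List Char) × Int :=
  (st.1 ++ [PySem.List.slice t (some st.2.2) (some gs), pvTagChunk tagc st.2.1.length],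
   st.2.1 ++ [PySem.List.slice t (some gs) (some ge)], ge)

-- single fused pass over the remaining sorted spans, carrying the current group
def pvFused (t tagc : List Char) (gs ge : Int)
    (st : List (List Char) × List (List Char) × Int) :
    List (Int × Int) → List (List Char) × List (List Char) × Int
  | [] => pvFlush t tagc st gs ge
  | (s, e) :: rs =>
    if s ≤ ge then pvFused t tagc gs (max ge e) st rs
    else pvFused t tagc s e (pvFlush t tagc st gs ge) rs

def mask_ranges_py_alt (text : String) (spans : List (Int × Int)) (tag : String) : String × List String :=
  let t := text.toList
  let st :=
    match PySem.List.sorted2 spans (fun p => p.1) (fun p => p.2) with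
    | [] => (([] : List (List Char)), ([] : List (List Char)), (0 : Int))
    | g :: rest => pvFused t tag.toList g.1 g.2 ([], [], 0) rest
  (String.ofList ((st.1 ++ [PySem.List.slice t (some st.2.2) none]).flatten),
   st.2.1.map String.ofList)

-- ===== PRECONDITION & SPEC =====
def Spec_mask_ranges_py (text : String) (spans : List (Int × Int)) (tag : String) (out : String × List String) : Prop := out = mask_ranges_py_alt text spans tag
instance (text : String) (spans : List (Int × Int)) (tag : String) (out : String × List String) : Decidable (Spec_mask_ranges_py text spans tag out) := by unfold Spec_mask_ranges_py; infer_instance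

-- ===== CLAIM (what is proved, stated in full; the proofs are below) =====
def Claim_equal_mask_ranges_py : Prop := ∀ (text : String) (spans : List (Int × Int)) (tag : String), Dom_mask_ranges_py text spans tag → Spec_mask_ranges_py text spans tag (mask_ranges_py text spans tag)

-- ===== LEMMAS AND PROOFS =====

-- the merge loop only touches the last element, so a fixed front passes through
theorem pvMergeLoop_concat (rest : List (Int × Int)) :
    ∀ (front : List (Int × Int)) (g : Int × Int),
      pvMergeLoop (front ++ [g]) rest = front ++ pvMergeLoop [g] rest := by
  induction rest with
  | nil => intro front g; simp [pvMergeLoop]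
  | cons p rs ih =>
    intro front g
    have step : ∀ m : List (Int × Int), pvMergeLoop m (p :: rs) =
        pvMergeLoop (if p.1 ≤ (m.getLastD (0, 0)).2 then
          m.dropLast ++ [((m.getLastD (0, 0)).1, max (m.getLastD (0, 0)).2 p.2)]
        else m ++ [p]) rs := fun m => rfl
    have hg : ([g].getLastD ((0 : Int), (0 : Int))) = g := by simp
    have hd : ([g] : List (Int × Int)).dropLast = [] := rfl
    rw [step (front ++ [g]), step [g]]
    simp only [List.getLastD_concat, List.dropLast_concat, hg, hd, List.nil_append]
    by_cases h : p.1 ≤ g.2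
    · simp only [h, if_pos]
      exact ih front (g.1, max g.2 p.2)
    · simp only [h, if_neg, not_false_iff]
      have h1 := ih (front ++ [g]) p
      have h2 := ih [g] p
      simp only [List.append_assoc, List.singleton_append] at h1 h2 ⊢
      rw [h1, h2]

-- fusing: emitting A\'s merged list from group g equals B\'s fused pass
theorem pvFused_eq (t tagc : List Char) (rest : List (Int × Int)) :
    ∀ (g : Int × Int) (st : List (List Char) × List (List Char) × Int),
      pvEmit t tagc st (pvMergeLoop [g] rest) = pvFused t tagc g.1 g.2 st rest := by
  induction rest with
  | nil =>
    intro g st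
    simp [pvMergeLoop, pvEmit, pvFused, pvFlush]
  | cons p rs ih =>
    intro g st
    obtain ⟨s, e⟩ := p
    have step : pvMergeLoop [g] ((s, e) :: rs) =
        pvMergeLoop (if s ≤ g.2 then [(g.1, max g.2 e)] else [g, (s, e)]) rs := by
      have : pvMergeLoop [g] ((s, e) :: rs) =
          pvMergeLoop (if (s, e).1 ≤ ([g].getLastD (0, 0)).2 then
            [g].dropLast ++ [(([g].getLastD (0, 0)).1, max ([g].getLastD (0, 0)).2 (s, e).2)]
          else [g] ++ [(s, e)]) rs := rfl
      simpa using this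
    rw [step]
    show _ = pvFused t tagc g.1 g.2 st ((s, e) :: rs)
    by_cases h : s ≤ g.2
    · simp only [h, if_pos, pvFused]
      exact ih (g.1, max g.2 e) st
    · simp only [h, if_neg, not_false_iff, pvFused]
      have hM : pvMergeLoop ([g] ++ [(s, e)]) rs = [g] ++ pvMergeLoop [(s, e)] rs :=
        pvMergeLoop_concat rs [g] (s, e)
      have hE : pvEmit t tagc st ([g] ++ pvMergeLoop [(s, e)] rs)
          = pvEmit t tagc (pvFlush t tagc st g.1 g.2) (pvMergeLoop [(s, e)] rs) := by
        simp [pvEmit, pvFlush]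
      rw [show ([g, (s, e)] : List (Int × Int)) = [g] ++ [(s, e)] from rfl, hM, hE]
      exact ih (s, e) _

-- ===== VERDICT (by name: the statement is the Claim_ definition above) =====
theorem mask_ranges_py_spec : Claim_equal_mask_ranges_py := by
  intro text spans tag _
  unfold Spec_mask_ranges_py mask_ranges_py mask_ranges_py_alt pvMergeSpans
  by_cases hs : spans = []
  · subst hs
    simp [PySem.List.sorted2, pvEmit]
  · simp only [hs, if_neg, not_false_iff]
    rcases hss : PySem.List.sorted2 spans (fun p => p.1) (fun p => p.2) with _ | ⟨g, rest⟩
    · exfalso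
      have := PySem.List.sorted2_perm spans (fun p => p.1) (fun p => p.2) false
      rw [hss] at this
      exact hs (this.symm.eq_nil)
    · rw [pvFused_eq]
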